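-- pv_equiv track=rewrite | github.com/ChengfeiYan/PLMGraph-Inter | paired/cluster_species.py | Tax_groupmsa
-- ===== SOURCE A (Python) =====
-- def Tax_groupmsa(common_species, parsed_msaA, parsed_msaB):
--
--     TaxID_dict = {}
--     for TaxID in common_species:
--         TaxID_dict[TaxID] = [[],[]]
--
--     for fasta in parsed_msaA:
--         TaxID = fasta[0][4]
--         if TaxID in common_species:
--             TaxID_dict[TaxID][0].append(fasta)
--
--     for fasta in parsed_msaB:
--
--         TaxID = fasta[0][4]
--         if TaxID in common_species:
--             TaxID_dict[TaxID][1].append(fasta)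
--
--     return TaxID_dict
-- ===== SOURCE B (Python) =====
-- def Tax_groupmsa(common_species, parsed_msaA, parsed_msaB):
--     return {TaxID: [[f for f in parsed_msaA if f[0][4] == TaxID],
--                     [f for f in parsed_msaB if f[0][4] == TaxID]]
--             for TaxID in common_species}
-- ===== Notes on version B (the rewrite author's own statement) =====
-- stated objective: simpler
-- what changed: Inverted traversal: instead of initializing a dict and dispatching each fasta into its bucket across three loops, B is a single dict comprehension over common_species whose buckets are order-preserving filter scans of each msa list.
import Mathlib
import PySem

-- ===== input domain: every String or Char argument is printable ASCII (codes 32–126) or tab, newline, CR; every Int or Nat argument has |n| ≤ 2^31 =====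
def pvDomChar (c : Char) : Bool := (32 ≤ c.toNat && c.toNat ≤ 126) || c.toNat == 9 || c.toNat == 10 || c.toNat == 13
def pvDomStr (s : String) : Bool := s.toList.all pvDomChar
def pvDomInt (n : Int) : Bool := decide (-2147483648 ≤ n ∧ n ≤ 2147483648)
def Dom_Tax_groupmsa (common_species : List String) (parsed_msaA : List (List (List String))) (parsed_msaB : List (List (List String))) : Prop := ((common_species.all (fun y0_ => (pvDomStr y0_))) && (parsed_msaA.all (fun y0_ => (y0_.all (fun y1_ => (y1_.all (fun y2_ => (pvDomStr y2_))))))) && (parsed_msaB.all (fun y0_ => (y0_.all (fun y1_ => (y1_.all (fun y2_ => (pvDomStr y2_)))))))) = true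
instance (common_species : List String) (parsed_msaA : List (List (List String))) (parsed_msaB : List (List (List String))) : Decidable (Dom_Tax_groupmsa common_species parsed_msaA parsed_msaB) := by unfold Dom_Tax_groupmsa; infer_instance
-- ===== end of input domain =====

-- B replaces A's init-then-dispatch over three loops by one dict comprehension over the
-- species whose two buckets are order-preserving filter scans of the msa lists (objective:
-- simpler).  A mutates nothing observable; the dicts are returned as insertion-order
-- association lists.

-- fasta[0][4] (none = the IndexError Python would raise; excluded by Pre_)
def pvTax? (fasta : List (List String)) : Option String :=
  (PySem.List.pyGet? fasta 0).bind (fun h => PySem.List.pyGet? h 4)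

-- ===== PORT A =====
-- TaxID_dict[TaxID][0].append(fasta): the stored values are exactly the two-bucket lists
-- [[],[]] A creates, so the in-place append at index 0 (resp. 1) is the [a,b] rewrite below.
def pvApp0 (fasta : List (List String)) (v : List (List (List (List String)))) : List (List (List (List String))) :=
  match v with | [a, b] => [a ++ [fasta], b] | v => v
def pvApp1 (fasta : List (List String)) (v : List (List (List (List String)))) : List (List (List (List String))) :=
  match v with | [a, b] => [a, b ++ [fasta]] | v => v

def Tax_groupmsa (common_species : List String) (parsed_msaA : List (List (List String))) (parsed_msaB : List (List (List String))) : List (String × List (List (List (List String)))) :=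
  let d0 : PySem.Dict String (List (List (List (List String)))) :=
    common_species.foldl (fun d t => d.insert t [[], []]) PySem.Dict.empty
  let d1 := parsed_msaA.foldl (fun d fasta =>
    match pvTax? fasta with
    | some t => if t ∈ common_species then d.modify t [[], []] (pvApp0 fasta) else d
    | none => d) d0
  let d2 := parsed_msaB.foldl (fun d fasta =>
    match pvTax? fasta with
    | some t => if t ∈ common_species then d.modify t [[], []] (pvApp1 fasta) else d
    | none => d) d1
  d2.items

-- ===== PORT B =====
-- [f for f in msa if f[0][4] == TaxID]
def pvBucket (msa : List (List (List String))) (t : String) : List (List (List String)) :=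
  msa.filter (fun f => pvTax? f == some t)

def Tax_groupmsa_alt (common_species : List String) (parsed_msaA : List (List (List String))) (parsed_msaB : List (List (List String))) : List (String × List (List (List (List String)))) :=
  (common_species.foldl
    (fun d t => d.insert t [pvBucket parsed_msaA t, pvBucket parsed_msaB t])
    (PySem.Dict.empty : PySem.Dict String (List (List (List (List String)))))).items

-- ===== PRECONDITION & SPEC =====
-- Pre_ excludes exactly the inputs on which Python A raises IndexError: a fasta in either
-- msa list that is empty or whose header row has fewer than 5 entries (fasta[0][4]).
def Pre_Tax_groupmsa (common_species : List String) (parsed_msaA : List (List (List String))) (parsed_msaB : List (List (List String))) : Prop :=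
  ∀ fasta ∈ parsed_msaA ++ parsed_msaB, 1 ≤ fasta.length ∧ 5 ≤ (fasta.headD []).length
instance (common_species : List String) (parsed_msaA : List (List (List String))) (parsed_msaB : List (List (List String))) : Decidable (Pre_Tax_groupmsa common_species parsed_msaA parsed_msaB) := by unfold Pre_Tax_groupmsa; infer_instance

def pvWitness_Tax_groupmsa : List String × List (List (List String)) × List (List (List String)) :=
  (["9606", "10090"], [[["a", "b", "c", "d", "9606"]]], [[["a", "b", "c", "d", "9606"]], [[" ", "", "x", "y", "7"]]])

def Spec_Tax_groupmsa (common_species : List String) (parsed_msaA : List (List (List String))) (parsed_msaB : List (List (List String))) (out : List (String × List (List (List (List String))))) : Prop := out = Tax_groupmsa_alt common_species parsed_msaA parsed_msaB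
instance (common_species : List String) (parsed_msaA : List (List (List String))) (parsed_msaB : List (List (List String))) (out : List (String × List (List (List (List String))))) : Decidable (Spec_Tax_groupmsa common_species parsed_msaA parsed_msaB out) := by unfold Spec_Tax_groupmsa; infer_instance

-- ===== CLAIM (what is proved, stated in full; the proofs are below) =====
def Claim_equal_Tax_groupmsa : Prop := ∀ (common_species : List String) (parsed_msaA : List (List (List String))) (parsed_msaB : List (List (List String))), Dom_Tax_groupmsa common_species parsed_msaA parsed_msaB → Pre_Tax_groupmsa common_species parsed_msaA parsed_msaB → Spec_Tax_groupmsa common_species parsed_msaA parsed_msaB (Tax_groupmsa common_species parsed_msaA parsed_msaB)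

-- ===== LEMMAS AND PROOFS =====

-- value at a key of an insert-fold whose value depends only on the key
theorem getD_foldl_insert_not_mem (g : String → List (List (List (List String)))) (dflt : List (List (List (List String)))) :
    ∀ (cs : List String) (d : PySem.Dict String (List (List (List (List String))))) (t : String), t ∉ cs →
      (cs.foldl (fun d t => d.insert t (g t)) d).getD t dflt = d.getD t dflt := by
  intro cs
  induction cs with
  | nil => intro d t _; rfl
  | cons c cs ih =>
    intro d t ht
    simp only [List.mem_cons, not_or] at ht
    simp only [List.foldl_cons, ih _ t ht.2, PySem.Dict.getD_insert, if_neg ht.1]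

theorem getD_foldl_insert_mem (g : String → List (List (List (List String)))) (dflt : List (List (List (List String)))) :
    ∀ (cs : List String) (d : PySem.Dict String (List (List (List (List String))))) (t : String), t ∈ cs →
      (cs.foldl (fun d t => d.insert t (g t)) d).getD t dflt = g t := by
  intro cs
  induction cs with
  | nil => intro _ _ h; cases h
  | cons c cs ih =>
    intro d t ht
    by_cases h : t ∈ cs
    · simpa using ih (d.insert c (g c)) t h
    · have hc : t = c := by rcases List.mem_cons.mp ht with h' | h' <;> tauto
      subst hc
      simp only [List.foldl_cons, getD_foldl_insert_not_mem g dflt cs _ t h,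
        PySem.Dict.getD_insert]
      simp

-- one dispatch phase of A, pointwise at a common key
theorem getD_foldl_phase (cs : List String) (app : List (List String) → List (List (List (List String))) → List (List (List (List String)))) :
    ∀ (msa : List (List (List String))) (d : PySem.Dict String (List (List (List (List String))))) (t : String), t ∈ cs →
      (msa.foldl (fun d fasta =>
        match pvTax? fasta with
        | some s => if s ∈ cs then d.modify s [[], []] (app fasta) else d
        | none => d) d).getD t [[], []] =
      (msa.filter (fun f => pvTax? f == some t)).foldl (fun v f => app f v) (d.getD t [[], []]) := by
  intro msa
  induction msa with
  | nil => intro _ _ _; rfl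
  | cons f msa ih =>
    intro d t ht
    simp only [List.foldl_cons, List.filter_cons]
    cases hf : pvTax? f with
    | none => simp [ih d t ht]
    | some s =>
      by_cases hs : s ∈ cs
      · by_cases hts : t = s
        · subst hts
          simp [hs, ih _ t ht]
        · have hst : ¬ s = t := fun h => hts h.symm
          simp [hs, ih _ t ht, PySem.Dict.getD_modify, hts, hst]
      · have hst : ¬ s = t := fun h => hs (h ▸ ht)
        simp [hs, ih d t ht, hst]

-- a dispatch phase does not change the key list (all touched keys are already present)
theorem keys_foldl_phase (cs : List String) (app : List (List String) → List (List (List (List String))) → List (List (List (List String)))) :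
    ∀ (msa : List (List (List String))) (d : PySem.Dict String (List (List (List (List String))))),
      (∀ s ∈ cs, d.contains s = true) →
      (msa.foldl (fun d fasta =>
        match pvTax? fasta with
        | some s => if s ∈ cs then d.modify s [[], []] (app fasta) else d
        | none => d) d).keys = d.keys := by
  intro msa
  induction msa with
  | nil => intro _ _; rfl
  | cons f msa ih =>
    intro d hd
    simp only [List.foldl_cons]
    cases hf : pvTax? f with
    | none => exact ih d hd
    | some s =>
      by_cases hs : s ∈ cs
      · have hkeys : (d.modify s [[], []] (app f)).keys = d.keys := by
          rw [PySem.Dict.keys_modify, PySem.Dict.keys_insert_of_contains _ _ (hd s hs)]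
        have hcont : ∀ u ∈ cs, (d.modify s [[], []] (app f)).contains u = true := by
          intro u hu
          rw [PySem.Dict.contains_iff_mem_keys, hkeys, ← PySem.Dict.contains_iff_mem_keys]
          exact hd u hu
        simp only [if_pos hs]
        rw [ih _ hcont, hkeys]
      · simp only [if_neg hs]; exact ih d hd

theorem foldl_app0_pair (fs : List (List (List String))) :
    ∀ (a b : List (List (List String))), fs.foldl (fun v f => pvApp0 f v) [a, b] = [a ++ fs, b] := by
  induction fs with
  | nil => intro a b; simp
  | cons f fs ih =>
    intro a b
    have h1 : pvApp0 f [a, b] = [a ++ [f], b] := rfl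
    rw [List.foldl_cons, h1, ih]; simp

theorem foldl_app1_pair (fs : List (List (List String))) :
    ∀ (a b : List (List (List String))), fs.foldl (fun v f => pvApp1 f v) [a, b] = [a, b ++ fs] := by
  induction fs with
  | nil => intro a b; simp
  | cons f fs ih =>
    intro a b
    have h1 : pvApp1 f [a, b] = [a, b ++ [f]] := rfl
    rw [List.foldl_cons, h1, ih]; simp

-- ===== VERDICT (by name: the statement is the Claim_ definition above) =====
theorem Tax_groupmsa_spec : Claim_equal_Tax_groupmsa := by
  intro cs msaA msaB _ _
  unfold Spec_Tax_groupmsa Tax_groupmsa Tax_groupmsa_alt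
  set d0 : PySem.Dict String (List (List (List (List String)))) :=
    cs.foldl (fun d t => d.insert t [[], []]) PySem.Dict.empty with hd0
  have hkeys0 : d0.keys = PySem.Set.ofList cs := by
    rw [hd0, PySem.Dict.keys_foldl_insert cs (fun _ t => [[], []]), PySem.Dict.keys_empty,
      PySem.Set.update_nil_left]
  have hnd0 : d0.keys.Nodup := by
    rw [hd0]; exact PySem.Dict.nodup_keys_foldl_insert cs (fun _ t => [[], []]) _ (by simp [PySem.Dict.keys_empty])
  have hcont0 : ∀ s ∈ cs, d0.contains s = true := by
    intro s hs
    rw [PySem.Dict.contains_iff_mem_keys, hkeys0, PySem.Set.mem_ofList]; exact hs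
  set d1 := msaA.foldl (fun d fasta =>
    match pvTax? fasta with
    | some t => if t ∈ cs then d.modify t [[], []] (pvApp0 fasta) else d
    | none => d) d0 with hd1
  set d2 := msaB.foldl (fun d fasta =>
    match pvTax? fasta with
    | some t => if t ∈ cs then d.modify t [[], []] (pvApp1 fasta) else d
    | none => d) d1 with hd2
  have hkeys1 : d1.keys = d0.keys := keys_foldl_phase cs pvApp0 msaA d0 hcont0
  have hcont1 : ∀ s ∈ cs, d1.contains s = true := by
    intro s hs
    rw [PySem.Dict.contains_iff_mem_keys, hkeys1, ← PySem.Dict.contains_iff_mem_keys]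
    exact hcont0 s hs
  have hkeys2 : d2.keys = d0.keys := by
    rw [hd2, keys_foldl_phase cs pvApp1 msaB d1 hcont1, hkeys1]
  have hnd2 : d2.keys.Nodup := by rw [hkeys2]; exact hnd0
  -- both sides as maps over the same key list
  rw [PySem.Dict.items_eq_map_keys d2 hnd2 [[], []]]
  have hkeysB : (cs.foldl (fun d t => d.insert t [pvBucket msaA t, pvBucket msaB t])
      (PySem.Dict.empty : PySem.Dict String (List (List (List (List String)))))).keys = PySem.Set.ofList cs := by
    rw [PySem.Dict.keys_foldl_insert cs (fun _ t => [pvBucket msaA t, pvBucket msaB t]),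
      PySem.Dict.keys_empty, PySem.Set.update_nil_left]
  have hndB : (cs.foldl (fun d t => d.insert t [pvBucket msaA t, pvBucket msaB t])
      (PySem.Dict.empty : PySem.Dict String (List (List (List (List String)))))).keys.Nodup := by
    rw [hkeysB]; exact PySem.Set.nodup_ofList cs
  rw [PySem.Dict.items_eq_map_keys _ hndB [[], []], hkeysB, hkeys2, hkeys0]
  apply List.map_congr_left
  intro t htset
  have ht : t ∈ cs := (PySem.Set.mem_ofList cs t).mp htset
  have hv2 : d2.getD t [[], []] = [pvBucket msaA t, pvBucket msaB t] := by
    rw [hd2, getD_foldl_phase cs pvApp1 msaB d1 t ht,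
      hd1, getD_foldl_phase cs pvApp0 msaA d0 t ht,
      hd0, getD_foldl_insert_mem (fun _ => [[], []]) [[], []] cs _ t ht,
      foldl_app0_pair, foldl_app1_pair]
    simp [pvBucket]
  rw [hv2, getD_foldl_insert_mem (fun t => [pvBucket msaA t, pvBucket msaB t]) [[], []] cs _ t ht]
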